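-- pv_equiv track=rewrite | github.com/first0506/Algorithm-Problem-Solving | 라인코딩테스트1.py | solution
-- ===== SOURCE A (Python) =====
-- def solution(inputString):
--     answer = 0
--     stack = []
--     op=['(', '{', '[', '<']
--     cl=[')', '}', ']', '>']
--     for i in inputString:
--         if i in op:
--             stack.append(i)
--         elif i in cl:
--             if not stack:
--                 answer = -1
--                 break
--             else:
--                 a = stack.pop()
--                 if a in op:
--                     answer +=1
--                 else:
--                     answer = -1
--                     break
--     return answer
-- ===== SOURCE B (Python) =====
-- def solution(inputString):
--     closers = ')}]>'
--     bal = 0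
--     for ch in inputString:
--         if ch in '({[<':
--             bal += 1
--         elif ch in closers:
--             bal -= 1
--             if bal < 0:
--                 return -1
--     return sum(ch in closers for ch in inputString)
-- ===== Notes on version B (the rewrite author's own statement) =====
-- stated objective: simpler
-- what changed: Drops the stack entirely: a running integer balance detects the first excess closer (return -1), and the matched-pair count is obtained afterwards as a plain count of closing brackets, instead of maintaining a stack and an incremental answer in one loop.
import Mathlib
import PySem

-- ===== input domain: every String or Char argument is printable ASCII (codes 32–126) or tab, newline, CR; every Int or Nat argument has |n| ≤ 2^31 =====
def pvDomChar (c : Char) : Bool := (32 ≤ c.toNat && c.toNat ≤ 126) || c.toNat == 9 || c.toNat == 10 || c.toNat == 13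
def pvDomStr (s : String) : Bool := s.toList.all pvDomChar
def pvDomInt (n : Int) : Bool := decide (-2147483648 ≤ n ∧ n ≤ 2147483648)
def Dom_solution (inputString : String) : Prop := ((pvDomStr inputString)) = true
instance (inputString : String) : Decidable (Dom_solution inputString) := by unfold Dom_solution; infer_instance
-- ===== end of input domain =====

-- B drops the stack: a running balance detects the first excess closer, and the answer is a plain count of closers (simpler).

-- ===== PORT A =====
def pvOp : List Char := ['(', '{', '[', '<']
def pvCl : List Char := [')', '}', ']', '>']

-- state: (answer, stack, broke); `broke = true` models Python's `break`
def solStepA (st : Int × List Char × Bool) (i : Char) : Int × List Char × Bool :=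
  match st with
  | (answer, stack, brk) =>
    if brk then (answer, stack, brk)
    else if i ∈ pvOp then (answer, i :: stack, brk)
    else if i ∈ pvCl then
      match stack with
      | [] => (-1, [], true)
      | a :: rest => if a ∈ pvOp then (answer + 1, rest, brk) else (-1, a :: rest, true)
    else (answer, stack, brk)

def solution (inputString : String) : Int :=
  (inputString.toList.foldl solStepA (0, [], false)).1

-- ===== PORT B =====
-- the `for` loop with early `return -1`: returns true iff the balance ever goes negative
def pvBalNeg : List Char → Int → Bool
  | [], _ => false
  | ch :: t, bal =>
    if ch ∈ pvOp then pvBalNeg t (bal + 1)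
    else if ch ∈ pvCl then
      if bal - 1 < 0 then true else pvBalNeg t (bal - 1)
    else pvBalNeg t bal

def solution_alt (inputString : String) : Int :=
  if pvBalNeg inputString.toList 0 then -1
  else (inputString.toList.countP (· ∈ pvCl) : Int)

-- ===== PRECONDITION & SPEC =====
def Spec_solution (inputString : String) (out : Int) : Prop := out = solution_alt inputString
instance (inputString : String) (out : Int) : Decidable (Spec_solution inputString out) := by unfold Spec_solution; infer_instance

-- ===== CLAIM (what is proved, stated in full; the proofs are below) =====
def Claim_equal_solution : Prop := ∀ (inputString : String), Dom_solution inputString → Spec_solution inputString (solution inputString)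

-- ===== LEMMAS AND PROOFS =====

theorem solStepA_main (l : List Char) (ans : Int) (stack : List Char)
    (hst : ∀ a ∈ stack, a ∈ pvOp) :
    (l.foldl solStepA (ans, stack, false)).1 =
      if pvBalNeg l (stack.length : Int) then -1 else ans + (l.countP (· ∈ pvCl) : Int) := by
  induction l generalizing ans stack with
  | nil => simp [pvBalNeg]
  | cons c t ih =>
    simp only [List.foldl, solStepA]
    by_cases hop : c ∈ pvOp
    · simp only [hop, if_pos, if_neg, Bool.false_eq_true, not_false_iff]
      rw [ih (ans) (c :: stack)
        (fun a ha => (List.mem_cons.mp ha).elim (fun h => h ▸ hop) (hst a))]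
      have hcl : ¬ c ∈ pvCl := by
        fin_cases hop <;> decide
      simp [pvBalNeg, hop, hcl]
    · by_cases hcl : c ∈ pvCl
      · simp only [hop, hcl, ite_true, Bool.false_eq_true, if_neg, not_false_iff]
        cases stack with
        | nil =>
          have hfold : ∀ (m : List Char) (s : Int × List Char × Bool), s.2.2 = true →
              m.foldl solStepA s = s := by
            intro m
            induction m with
            | nil => intro s _; rfl
            | cons x xs ihm =>
              intro s hs
              simp only [List.foldl, solStepA]
              obtain ⟨a1, a2, a3⟩ := s
              simp at hs; subst hs
              exact ihm _ rfl
          simp [pvBalNeg, hop, hcl, hfold]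
        | cons a rest =>
          have hap : a ∈ pvOp := hst a (by simp)
          simp only [hap, ite_true]
          rw [ih (ans + 1) rest (fun x hx => hst x (by simp [hx]))]
          have hlen : ((a :: rest).length : Int) - 1 = (rest.length : Int) := by simp
          have hneg : ¬ (((a :: rest).length : Int) - 1 < 0) := by omega
          simp only [pvBalNeg, hop, hcl, hlen, List.countP_cons, if_false,
            ite_true, decide_true]
          have h0 : ¬ ((rest.length : Int) < 0) := by omega
          rw [if_neg h0]
          split
          · rfl
          · push_cast
            ring
      · simp only [hop, hcl, Bool.false_eq_true, if_neg, not_false_iff]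
        rw [ih ans stack hst]
        simp [pvBalNeg, hop, hcl]

-- ===== VERDICT (by name: the statement is the Claim_ definition above) =====
theorem solution_spec : Claim_equal_solution := by
  intro s _
  unfold Spec_solution solution solution_alt
  rw [solStepA_main s.toList 0 [] (by intro a h; cases h)]
  simp
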